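-- pv_equiv track=rewrite | github.com/petersawm/Leetcode-Solution | coding/bracket_expansion.py | expand_single_brace_part2
-- ===== SOURCE A (Python) =====
-- def _find_single_brace_pair(s: str):
--     l = s.find("{")
--     if l == -1:
--         return -1, -1
--     r = s.find("}", l + 1)
--     if r == -1 or r < l:
--         return -1, -1
--     first_close = s.find("}")
--     if first_close != -1 and first_close < l:
--         return -1, -1
--     return l, r
--
-- def expand_single_brace_part2(s: str):
--     l, r = _find_single_brace_pair(s)
--     if l == -1:
--         return [s]
--     inside = s[l + 1: r]
--     raw = inside.split(",")
--     tokens = [t for t in raw if t != ""]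
--     if len(tokens) < 2:
--         return [s]
--
--     prefix = s[:l]
--     suffix = s[r + 1:]
--     return [prefix + t + suffix for t in tokens]
-- ===== SOURCE B (Python) =====
-- def expand_single_brace_part2(s: str):
--     # Single left-to-right scan: a three-state machine over the characters,
--     # accumulating prefix, comma-separated tokens and suffix in one pass.
--     prefix_chars = []
--     tokens = []
--     cur = []
--     suffix_chars = []
--     state = 0  # 0 = before '{', 1 = inside braces, 2 = after '}'
--     for ch in s:
--         if state == 0:
--             if ch == '}':
--                 return [s]
--             elif ch == '{':
--                 state = 1
--             else:
--                 prefix_chars.append(ch)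
--         elif state == 1:
--             if ch == '}':
--                 if cur:
--                     tokens.append(''.join(cur))
--                 state = 2
--             elif ch == ',':
--                 if cur:
--                     tokens.append(''.join(cur))
--                 cur = []
--             else:
--                 cur.append(ch)
--         else:
--             suffix_chars.append(ch)
--     if state != 2 or len(tokens) < 2:
--         return [s]
--     prefix = ''.join(prefix_chars)
--     suffix = ''.join(suffix_chars)
--     return [prefix + t + suffix for t in tokens]
-- ===== Notes on version B (the rewrite author's own statement) =====
-- stated objective: alternative
-- what changed: B replaces A's staged index searches (str.find for '{' and '}', ordering checks, slicing, inside.split(',')) by a single left-to-right character scan: a three-state machine that accumulates prefix, the comma-separated tokens and suffix in one pass over the string.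
import Mathlib
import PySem

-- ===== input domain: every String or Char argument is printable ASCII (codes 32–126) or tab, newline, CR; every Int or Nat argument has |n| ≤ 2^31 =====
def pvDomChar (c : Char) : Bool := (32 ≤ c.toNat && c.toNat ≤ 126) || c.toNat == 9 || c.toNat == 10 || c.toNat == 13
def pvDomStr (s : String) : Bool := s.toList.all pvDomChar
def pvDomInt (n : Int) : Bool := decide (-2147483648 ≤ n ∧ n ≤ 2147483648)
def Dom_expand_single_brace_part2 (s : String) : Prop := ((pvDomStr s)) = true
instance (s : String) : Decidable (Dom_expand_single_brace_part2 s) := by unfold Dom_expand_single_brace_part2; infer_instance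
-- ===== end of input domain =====

-- B replaces A's staged str.find index searches, ordering checks, slicing and split
-- by a single left-to-right character scan (a three-state machine collecting prefix,
-- tokens and suffix in one pass); objective: alternative, same cost.

-- ===== PORT A =====
def find_single_brace_pair (s : String) : Int × Int :=
  let l := PySem.Str.find s "{"
  if l = -1 then (-1, -1)
  else
    let r := PySem.Str.findFrom s "}" (l + 1)
    if r = -1 ∨ r < l then (-1, -1)
    else
      let first_close := PySem.Str.find s "}"
      if first_close ≠ -1 ∧ first_close < l then (-1, -1)
      else (l, r)

def expand_single_brace_part2 (s : String) : List String :=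
  let lr := find_single_brace_pair s
  if lr.1 = -1 then [s]
  else
    let inside := PySem.Str.slice s (some (lr.1 + 1)) (some lr.2)
    let raw := (PySem.Str.split? inside ",").getD []
    let tokens := raw.filter (fun t => t ≠ "")
    if tokens.length < 2 then [s]
    else
      let pre := PySem.Str.slice s none (some lr.1)
      let suffix := PySem.Str.slice s (some (lr.2 + 1)) none
      tokens.map (fun t => pre ++ t ++ suffix)

-- ===== PORT B =====
-- state 2 of the scan: after the closing '}', every remaining char joins the suffix
def pvScan2 (cs acc : List Char) : List Char :=
  match cs with
  | [] => acc
  | c :: rest => pvScan2 rest (acc ++ [c])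

-- state 1: inside the braces, collecting comma-separated nonempty tokens;
-- none = the loop ended without ever reaching state 2
def pvScan1 (cs cur : List Char) (tokens : List (List Char)) :
    Option (List (List Char) × List Char) :=
  match cs with
  | [] => none
  | c :: rest =>
    if c = '}' then some ((if cur ≠ [] then tokens ++ [cur] else tokens), pvScan2 rest [])
    else if c = ',' then pvScan1 rest [] (if cur ≠ [] then tokens ++ [cur] else tokens)
    else pvScan1 rest (cur ++ [c]) tokens

-- state 0: before the '{', collecting the prefix; none = early `return [s]` on a
-- stray '}' or the loop ending before state 2
def pvScan0 (cs pre : List Char) : Option (List Char × List (List Char) × List Char) :=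
  match cs with
  | [] => none
  | c :: rest =>
    if c = '}' then none
    else if c = '{' then
      match pvScan1 rest [] [] with
      | none => none
      | some (tokens, suffix) => some (pre, tokens, suffix)
    else pvScan0 rest (pre ++ [c])

def expand_single_brace_part2_alt (s : String) : List String :=
  match pvScan0 s.toList [] with
  | none => [s]
  | some (pre, tokens, suffix) =>
    if tokens.length < 2 then [s]
    else tokens.map (fun t => String.ofList (pre ++ t ++ suffix))

-- ===== PRECONDITION & SPEC =====
def Spec_expand_single_brace_part2 (s : String) (out : List String) : Prop := out = expand_single_brace_part2_alt s
instance (s : String) (out : List String) : Decidable (Spec_expand_single_brace_part2 s out) := by unfold Spec_expand_single_brace_part2; infer_instance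

-- ===== CLAIM (what is proved, stated in full; the proofs are below) =====
def Claim_equal_expand_single_brace_part2 : Prop := ∀ (s : String), Dom_expand_single_brace_part2 s → Spec_expand_single_brace_part2 s (expand_single_brace_part2 s)

-- ===== LEMMAS AND PROOFS =====

-- [c] is a prefix of cs.drop i exactly when cs[i] is c.
theorem pv_single_prefix_drop (cs : List Char) (c : Char) (i : Nat) :
    [c] <+: cs.drop i ↔ cs[i]? = some c := by
  rw [← List.head?_drop]
  cases cs.drop i with
  | nil => simp
  | cons x xs =>
      simp only [List.cons_prefix_cons, List.nil_prefix, and_true, List.head?_cons,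
        Option.some.injEq]
      exact ⟨fun h => h.symm, fun h => h.symm⟩

theorem pv_find_single_eq_neg_one (cs : List Char) (c : Char) :
    PySem.Chars.find cs [c] = -1 ↔ c ∉ cs := by
  rw [PySem.Chars.find_eq_neg_one_iff]
  constructor
  · intro h hc
    obtain ⟨l₁, l₂, rfl⟩ := List.append_of_mem hc
    exact h ⟨l₁, l₂, by simp⟩
  · intro h hinf
    exact h (hinf.subset (by simp))

theorem pv_find_single_spec (cs : List Char) (c : Char)
    (h : 0 ≤ PySem.Chars.find cs [c]) :
    cs[(PySem.Chars.find cs [c]).toNat]? = some c ∧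
      ∀ i < (PySem.Chars.find cs [c]).toNat, cs[i]? ≠ some c := by
  obtain ⟨h1, h2⟩ := PySem.Chars.find_spec h
  refine ⟨(pv_single_prefix_drop cs c _).mp h1, fun i hi hc => ?_⟩
  exact h2 i hi ((pv_single_prefix_drop cs c i).mpr hc)

theorem pv_find_single_of_first (cs : List Char) (c : Char) (k : Nat)
    (hk : cs[k]? = some c) (hmin : ∀ i < k, cs[i]? ≠ some c) :
    PySem.Chars.find cs [c] = (k : Int) := by
  have hmem : c ∈ cs := List.mem_of_getElem? hk
  have hne : PySem.Chars.find cs [c] ≠ -1 := by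
    intro h; exact (pv_find_single_eq_neg_one cs c).mp h hmem
  have hge : -1 ≤ PySem.Chars.find cs [c] := PySem.Chars.neg_one_le_find cs [c]
  have h0 : 0 ≤ PySem.Chars.find cs [c] := by omega
  obtain ⟨h1, h2⟩ := pv_find_single_spec cs c h0
  have : (PySem.Chars.find cs [c]).toNat = k := by
    rcases Nat.lt_trichotomy (PySem.Chars.find cs [c]).toNat k with h | h | h
    · exact absurd h1 (hmin _ h)
    · exact h
    · exact absurd hk (h2 _ h)
  omega

-- splitOnP on a comma-free list
theorem pv_splitOnP_nomem (l : List Char) (h : ',' ∉ l) :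
    List.splitOnP (· == ',') l = [l] := by
  induction l with
  | nil => simp [List.splitOnP_nil]
  | cons a l ih =>
      have ha : a ≠ ',' := fun hc => h (hc ▸ List.mem_cons_self)
      rw [List.splitOnP_cons, if_neg (by simpa using ha),
        ih (fun hc => h (List.mem_cons_of_mem a hc))]
      rfl

-- splitOnP across the first comma
theorem pv_splitOnP_append (l₁ l₂ : List Char) (h : ',' ∉ l₁) :
    List.splitOnP (· == ',') (l₁ ++ ',' :: l₂) = l₁ :: List.splitOnP (· == ',') l₂ := by
  induction l₁ with
  | nil => rw [List.nil_append, List.splitOnP_cons, if_pos (by simp)]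
  | cons a l₁ ih =>
      have ha : a ≠ ',' := fun hc => h (hc ▸ List.mem_cons_self)
      rw [List.cons_append, List.splitOnP_cons, if_neg (by simpa using ha),
        ih (fun hc => h (List.mem_cons_of_mem a hc))]
      rfl

-- PySem's splitOn with separator "," is splitOnP (· == ',')
theorem pv_go_comma (l : List Char) : ∀ (fuel : Nat) (cur : List Char) (acc : List (List Char)),
    l.length < fuel →
    PySem.Chars.splitOn.go [','] fuel l cur acc
      = acc.reverse ++ (List.splitOnP (· == ',') l).modifyHead (cur.reverse ++ ·) := by
  induction l with
  | nil =>
      intro fuel cur acc hf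
      cases fuel with
      | zero => omega
      | succ f => simp [PySem.Chars.splitOn.go, List.splitOnP_nil]
  | cons c rest ih =>
      intro fuel cur acc hf
      cases fuel with
      | zero => simp at hf
      | succ f =>
          have hf' : rest.length < f := by simp at hf; omega
          by_cases hc : c = ','
          · subst hc
            have hpre : [','].isPrefixOf (',' :: rest) = true := by simp [List.isPrefixOf]
            rw [show PySem.Chars.splitOn.go [','] (f + 1) (',' :: rest) cur acc
                  = PySem.Chars.splitOn.go [','] f rest [] (cur.reverse :: acc) by
                simp [PySem.Chars.splitOn.go, hpre]]
            rw [ih f [] (cur.reverse :: acc) hf']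
            rw [List.splitOnP_cons, if_pos (by simp)]
            cases h : List.splitOnP (· == ',') rest with
            | nil => simp
            | cons x xs => simp
          · have hpre : [','].isPrefixOf (c :: rest) = false := by
              simp [List.isPrefixOf, Ne.symm hc]
            rw [show PySem.Chars.splitOn.go [','] (f + 1) (c :: rest) cur acc
                  = PySem.Chars.splitOn.go [','] f rest (c :: cur) acc by
                simp [PySem.Chars.splitOn.go, hpre]]
            rw [ih f (c :: cur) acc hf']
            rw [List.splitOnP_cons, if_neg (by simpa using hc)]
            cases h : List.splitOnP (· == ',') rest with
            | nil => simp
            | cons x xs => simp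

theorem pv_splitOn_comma (l : List Char) :
    PySem.Chars.splitOn l [','] = List.splitOnP (· == ',') l := by
  rw [PySem.Chars.splitOn, pv_go_comma l (l.length + 1) [] [] (by omega)]
  cases h : List.splitOnP (· == ',') l with
  | nil => simp
  | cons x xs => simp

theorem pv_filter_map_ofList (l : List (List Char)) :
    (l.map String.ofList).filter (fun t => t ≠ "") =
      (l.filter (fun t => t ≠ [])).map String.ofList := by
  rw [List.filter_map]
  congr 1
  apply List.filter_congr
  intro t _
  simp [Function.comp]

-- ---- scan characterizations ----

theorem pv_scan2_eq (cs : List Char) : ∀ acc, pvScan2 cs acc = acc ++ cs := by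
  induction cs with
  | nil => intro acc; simp [pvScan2]
  | cons c rest ih => intro acc; rw [pvScan2, ih]; simp

theorem pv_scan1_none (cs : List Char) (h : '}' ∉ cs) :
    ∀ cur tokens, pvScan1 cs cur tokens = none := by
  induction cs with
  | nil => intro cur tokens; rfl
  | cons c rest ih =>
      intro cur tokens
      have hc : c ≠ '}' := fun hc => h (hc ▸ List.mem_cons_self)
      have h' : '}' ∉ rest := fun hm => h (List.mem_cons_of_mem c hm)
      rw [pvScan1, if_neg hc]
      by_cases hcm : c = ','
      · rw [if_pos hcm, ih h']
      · rw [if_neg hcm, ih h']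

theorem pv_scan1_found (cs : List Char) : ∀ (m : Nat), cs[m]? = some '}' →
    (∀ i < m, cs[i]? ≠ some '}') → ∀ cur tokens, ',' ∉ cur →
    pvScan1 cs cur tokens =
      some (tokens ++ (List.splitOnP (· == ',') (cur ++ cs.take m)).filter (· ≠ []),
        cs.drop (m + 1)) := by
  induction cs with
  | nil => intro m hk; simp at hk
  | cons c rest ih =>
      intro m hk hmin cur tokens hcur
      cases m with
      | zero =>
          simp only [List.getElem?_cons_zero, Option.some.injEq] at hk
          subst hk
          rw [pvScan1, if_pos rfl, pv_scan2_eq]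
          simp only [List.take_zero, List.append_nil, List.drop_succ_cons, List.drop_zero,
            List.nil_append]
          rw [pv_splitOnP_nomem cur hcur]
          by_cases hne : cur = []
          · subst hne; simp
          · simp [hne]
      | succ m' =>
          have hc : c ≠ '}' := by
            intro hc; exact hmin 0 (Nat.succ_pos _) (by simp [hc])
          have hk' : rest[m']? = some '}' := by simpa using hk
          have hmin' : ∀ i < m', rest[i]? ≠ some '}' := by
            intro i hi
            have := hmin (i + 1) (by omega)
            simpa using this
          rw [pvScan1, if_neg hc]
          by_cases hcm : c = ','
          · subst hcm
            rw [if_pos rfl, ih m' hk' hmin' [] _ (by simp)]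
            simp only [List.take_succ_cons, List.drop_succ_cons, List.nil_append]
            rw [pv_splitOnP_append cur (rest.take m') hcur]
            rw [List.filter_cons]
            by_cases hne : cur = []
            · subst hne; simp
            · simp [hne]
          · rw [if_neg hcm, ih m' hk' hmin' (cur ++ [c]) tokens
              (by
                intro hmem
                rcases List.mem_append.mp hmem with h | h
                · exact hcur h
                · simp at h; exact hcm h.symm)]
            simp only [List.take_succ_cons, List.drop_succ_cons, List.append_assoc,
              List.cons_append, List.nil_append]

theorem pv_scan0_none_of_no_open (cs : List Char) (h : '{' ∉ cs) :
    ∀ pre, pvScan0 cs pre = none := by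
  induction cs with
  | nil => intro pre; rfl
  | cons c rest ih =>
      intro pre
      have hc : c ≠ '{' := fun hc => h (hc ▸ List.mem_cons_self)
      have h' : '{' ∉ rest := fun hm => h (List.mem_cons_of_mem c hm)
      rw [pvScan0]
      by_cases hcl : c = '}'
      · rw [if_pos hcl]
      · rw [if_neg hcl, if_neg hc, ih h']

theorem pv_scan0_none_of_close (cs : List Char) : ∀ (k : Nat), cs[k]? = some '}' →
    (∀ i ≤ k, cs[i]? ≠ some '{') → ∀ pre, pvScan0 cs pre = none := by
  induction cs with
  | nil => intro k hk; simp at hk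
  | cons c rest ih =>
      intro k hk h pre
      rw [pvScan0]
      by_cases hcl : c = '}'
      · rw [if_pos hcl]
      · have hk0 : k ≠ 0 := by
          intro h0; subst h0
          simp only [List.getElem?_cons_zero, Option.some.injEq] at hk
          exact hcl hk
        obtain ⟨k', rfl⟩ := Nat.exists_eq_succ_of_ne_zero hk0
        have hc : c ≠ '{' := by
          intro hc
          exact h 0 (by omega) (by simp [hc])
        rw [if_neg hcl, if_neg hc]
        exact ih k' (by simpa using hk)
          (fun i hi => by
            have := h (i + 1) (by omega)
            simpa using this) _

theorem pv_scan0_found (cs : List Char) : ∀ (n : Nat), cs[n]? = some '{' →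
    (∀ i < n, cs[i]? ≠ some '{' ∧ cs[i]? ≠ some '}') → ∀ pre,
    pvScan0 cs pre =
      match pvScan1 (cs.drop (n + 1)) [] [] with
      | none => none
      | some (tokens, suffix) => some (pre ++ cs.take n, tokens, suffix) := by
  induction cs with
  | nil => intro n hn; simp at hn
  | cons c rest ih =>
      intro n hn hmin pre
      cases n with
      | zero =>
          simp only [List.getElem?_cons_zero, Option.some.injEq] at hn
          subst hn
          rw [pvScan0, if_neg (by decide), if_pos rfl]
          simp only [List.drop_succ_cons, List.drop_zero, List.take_zero, List.append_nil]
      | succ n' =>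
          have hc1 : c ≠ '{' := by
            intro hc; exact (hmin 0 (Nat.succ_pos _)).1 (by simp [hc])
          have hc2 : c ≠ '}' := by
            intro hc; exact (hmin 0 (Nat.succ_pos _)).2 (by simp [hc])
          rw [pvScan0, if_neg hc2, if_neg hc1]
          rw [ih n' (by simpa using hn)
            (fun i hi => by
              have := hmin (i + 1) (by omega)
              constructor
              · simpa using this.1
              · simpa using this.2) (pre ++ [c])]
          simp only [List.drop_succ_cons, List.take_succ_cons, List.cons_append,
            List.append_assoc, List.nil_append]

-- ===== VERDICT (by name: the statement is the Claim_ definition above) =====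
theorem expand_single_brace_part2_spec : Claim_equal_expand_single_brace_part2 := by
  intro s _
  unfold Spec_expand_single_brace_part2
  have hbr : ("{" : String).toList = ['{'] := rfl
  have hcl : ("}" : String).toList = ['}'] := rfl
  have hcm : ("," : String).toList = [','] := rfl
  simp only [expand_single_brace_part2, expand_single_brace_part2_alt]
  generalize hcs : s.toList = cs
  by_cases h1 : PySem.Chars.find cs ['{'] = -1
  · -- no '{' in s at all: both sides return [s]
    have hmem : '{' ∉ cs := (pv_find_single_eq_neg_one cs '{').mp h1
    have hpair : find_single_brace_pair s = (-1, -1) := by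
      rw [find_single_brace_pair]
      simp only [PySem.Str.find_eq, hbr, hcs]
      rw [if_pos h1]
    rw [pv_scan0_none_of_no_open cs hmem [], hpair]
    simp
  · -- first '{' at index n
    have h0 : 0 ≤ PySem.Chars.find cs ['{'] := by
      have := PySem.Chars.neg_one_le_find cs ['{']
      omega
    set n := (PySem.Chars.find cs ['{']).toNat with hn
    have hfind : PySem.Chars.find cs ['{'] = (n : Int) := by omega
    obtain ⟨hgn, hminn⟩ := pv_find_single_spec cs '{' h0
    rw [← hn] at hgn hminn
    have hnlen : n < cs.length := (List.getElem?_eq_some_iff.mp hgn).1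
    have hcast : ((n : Int) + 1) = ((n + 1 : Nat) : Int) := by push_cast; ring
    have hlen1 : n + 1 ≤ cs.length := by omega
    by_cases hhead : '}' ∈ cs.take n
    · -- a '}' occurs before the first '{': both sides return [s]
      obtain ⟨i, hi, hgi⟩ := List.getElem_of_mem hhead
      have hilen : i < n := by
        have := hi; simp only [List.length_take] at this; omega
      have hgi' : cs[i]? = some '}' := by
        have h := List.getElem?_eq_getElem hi
        rw [hgi, List.getElem?_take_of_lt hilen] at h
        exact h
      -- the first '}' overall sits strictly before n
      have hfc0 : 0 ≤ PySem.Chars.find cs ['}'] := by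
        have hne : PySem.Chars.find cs ['}'] ≠ -1 := by
          intro h
          exact (pv_find_single_eq_neg_one cs '}').mp h (List.mem_of_getElem? hgi')
        have := PySem.Chars.neg_one_le_find cs ['}']
        omega
      obtain ⟨hfg, hfmin⟩ := pv_find_single_spec cs '}' hfc0
      have hfclt : (PySem.Chars.find cs ['}']).toNat < n := by
        by_contra hge
        exact hfmin i (by omega) hgi'
      have hpair : find_single_brace_pair s = (-1, -1) := by
        rw [find_single_brace_pair]
        simp only [PySem.Str.find_eq, hbr, hcl, hcs]
        rw [if_neg h1, hfind]
        by_cases hc1 : PySem.Str.findFrom s "}" ((n : Int) + 1) = -1 ∨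
            PySem.Str.findFrom s "}" ((n : Int) + 1) < (n : Int)
        · rw [if_pos hc1]
        · rw [if_neg hc1, if_pos ⟨by omega, by omega⟩]
      rw [pv_scan0_none_of_close cs i hgi'
        (fun j hj => hminn j (by omega)) [], hpair]
      simp
    · -- no '}' before the first '{'
      have hmin2 : ∀ i < n, cs[i]? ≠ some '{' ∧ cs[i]? ≠ some '}' := by
        intro i hi
        refine ⟨hminn i hi, fun hcj => hhead ?_⟩
        apply List.mem_of_getElem? (l := cs.take n) (i := i)
        rw [List.getElem?_take_of_lt hi]
        exact hcj
      set rest := cs.drop (n + 1) with hrest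
      have hFF : PySem.Str.findFrom s "}" ((n : Int) + 1) =
          if PySem.Chars.find rest ['}'] = -1 then -1
          else ((n + 1 : Nat) : Int) + PySem.Chars.find rest ['}'] := by
        rw [PySem.Str.findFrom_eq, hcl, hcs, hcast,
          PySem.Chars.findFrom_natCast cs ['}'] (n + 1) hlen1]
      rw [pv_scan0_found cs n hgn hmin2 []]
      by_cases h2 : PySem.Chars.find rest ['}'] = -1
      · -- no '}' after the '{': both sides return [s]
        have hmem2 : '}' ∉ rest := (pv_find_single_eq_neg_one _ '}').mp h2
        have hpair : find_single_brace_pair s = (-1, -1) := by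
          rw [find_single_brace_pair]
          simp only [PySem.Str.find_eq, hbr, hcl, hcs]
          rw [if_neg h1, hfind, if_pos (Or.inl (by rw [hFF, if_pos h2]))]
        rw [pv_scan1_none rest hmem2, hpair]
        simp
      · -- first '}' after the '{' at offset m in the tail
        have h02 : 0 ≤ PySem.Chars.find rest ['}'] := by
          have := PySem.Chars.neg_one_le_find rest ['}']
          omega
        set m := (PySem.Chars.find rest ['}']).toNat with hm
        have hfind2 : PySem.Chars.find rest ['}'] = (m : Int) := by omega
        obtain ⟨hgm, hminm⟩ := pv_find_single_spec rest '}' h02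
        rw [← hm] at hgm hminm
        have hmlen : m < rest.length := (List.getElem?_eq_some_iff.mp hgm).1
        rw [pv_scan1_found rest m hgm hminm [] [] (by simp)]
        have hr : PySem.Str.findFrom s "}" ((n : Int) + 1) = ((n + 1 + m : Nat) : Int) := by
          rw [hFF, if_neg h2, hfind2]
          push_cast
          ring
        -- the first '}' of the whole string is at n + 1 + m
        have hgfull : cs[n + 1 + m]? = some '}' := by
          have h := hgm
          rw [hrest, List.getElem?_drop] at h
          exact h
        have hminfull : ∀ i < n + 1 + m, cs[i]? ≠ some '}' := by
          intro i hi hci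
          rcases Nat.lt_trichotomy i n with hlt | heq | hgt
          · exact (hmin2 i hlt).2 hci
          · subst heq
            rw [hci] at hgn
            simp at hgn
          · have hi' : i - (n + 1) < m := by omega
            apply hminm (i - (n + 1)) hi'
            rw [hrest, List.getElem?_drop]
            rw [show n + 1 + (i - (n + 1)) = i by omega]
            exact hci
        have hfcfull : PySem.Chars.find cs ['}'] = ((n + 1 + m : Nat) : Int) :=
          pv_find_single_of_first cs '}' (n + 1 + m) hgfull hminfull
        have hpair : find_single_brace_pair s = ((n : Int), ((n + 1 + m : Nat) : Int)) := by
          rw [find_single_brace_pair]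
          simp only [PySem.Str.find_eq, hbr, hcl, hcs]
          rw [if_neg h1, hfind, hr, hfcfull]
          rw [if_neg (by push_cast; omega), if_neg (by push_cast; omega)]
        have hp1 : (find_single_brace_pair s).1 = (n : Int) := by rw [hpair]
        have hp2 : (find_single_brace_pair s).2 = ((n + 1 + m : Nat) : Int) := by rw [hpair]
        rw [hp1, hp2]
        -- identify inside / prefix / suffix on the A side
        have hinsA : (PySem.Str.slice s (some ((n : Int) + 1))
            (some ((n + 1 + m : Nat) : Int))).toList = rest.take m := by
          rw [PySem.Str.toList_slice, PySem.Chars.slice_eq_listSlice, hcs, hcast,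
            PySem.List.slice_natCast, hrest]
          congr 1
          omega
        have hpreA : (PySem.Str.slice s none (some (n : Int))).toList = cs.take n := by
          rw [PySem.Str.toList_slice, PySem.Chars.slice_eq_listSlice, hcs]
          exact PySem.List.slice_to_natCast cs n
        have hsufA : (PySem.Str.slice s (some (((n + 1 + m : Nat) : Int) + 1)) none).toList
            = rest.drop (m + 1) := by
          rw [PySem.Str.toList_slice, PySem.Chars.slice_eq_listSlice, hcs]
          rw [show (((n + 1 + m : Nat) : Int) + 1) = ((n + 1 + m + 1 : Nat) : Int) by push_cast; ring]
          rw [PySem.List.slice_from_natCast, hrest, List.drop_drop]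
          congr 1
        -- A's token list is B's, mapped through ofList
        have hsplit : (PySem.Str.split? (PySem.Str.slice s (some ((n : Int) + 1))
            (some ((n + 1 + m : Nat) : Int))) ",").getD [] =
            (PySem.Chars.splitOn (rest.take m) [',']).map String.ofList := by
          rw [PySem.Str.split?, hcm, hinsA, PySem.Chars.split?]
          rfl
        rw [hsplit, pv_splitOn_comma, pv_filter_map_ofList]
        rw [if_neg (show ¬((n : Int) = -1) by omega)]
        simp only [List.length_map, List.nil_append]
        split_ifs with hlt2
        · rfl
        · rw [List.map_map]
          apply List.map_congr_left
          intro t _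
          apply String.toList_inj.mp
          simp only [Function.comp, String.toList_append, String.toList_ofList,
            hpreA, hsufA, List.append_assoc]
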